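-- pv_equiv track=rewrite | github.com/dhanyabhat16/Test_case_generator | ui/app.py | _extract_traceability
-- ===== SOURCE A (Python) =====
-- def _extract_traceability(content: str) -> tuple[str, str]:
--     """Split file content into code part and traceability comment block."""
--     lines       = content.splitlines()
--     code_lines  = []
--     trace_lines = []
--     in_trace    = False
--
--     for line in lines:
--         if "TRACEABILITY REPORT" in line:
--             in_trace = True
--         if in_trace:
--             trace_lines.append(line)
--         else:
--             code_lines.append(line)
--
--     return "\n".join(code_lines), "\n".join(trace_lines)
-- ===== SOURCE B (Python) =====
-- def _extract_traceability(content: str) -> tuple[str, str]: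
--     """Split file content into code part and traceability comment block."""
--     lines = content.splitlines()
--     idx = next((i for i, line in enumerate(lines) if "TRACEABILITY REPORT" in line), len(lines))
--     return "\n".join(lines[:idx]), "\n".join(lines[idx:])
-- ===== Notes on version B (the rewrite author's own statement) =====
-- stated objective: simpler
-- what changed: Replaces the stateful accumulation loop (in_trace flag with two appending branches) by locating the first marker line's index and slicing the line list there.
import Mathlib
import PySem

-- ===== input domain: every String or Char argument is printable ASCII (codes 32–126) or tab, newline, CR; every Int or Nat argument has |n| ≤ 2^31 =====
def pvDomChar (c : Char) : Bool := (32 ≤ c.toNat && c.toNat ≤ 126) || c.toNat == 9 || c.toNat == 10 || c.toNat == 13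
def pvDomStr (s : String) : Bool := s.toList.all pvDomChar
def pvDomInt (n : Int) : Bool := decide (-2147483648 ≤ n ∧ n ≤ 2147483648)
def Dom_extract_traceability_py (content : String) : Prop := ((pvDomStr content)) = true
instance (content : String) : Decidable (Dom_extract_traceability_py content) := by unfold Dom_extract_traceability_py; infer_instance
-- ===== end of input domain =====

-- B replaces A's stateful in_trace accumulation loop by finding the first marker line's
-- index and slicing the line list there (objective: simpler).


-- ===== PORT A =====
-- one loop iteration of A: state = (code_lines, trace_lines, in_trace)
def pvStepA (st : List String × List String × Bool) (line : String) :
    List String × List String × Bool :=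
  let inTrace := if PySem.Str.isIn "TRACEABILITY REPORT" line then true else st.2.2
  if inTrace then (st.1, st.2.1 ++ [line], inTrace)
  else (st.1 ++ [line], st.2.1, inTrace)

def extract_traceability_py (content : String) : String × String :=
  let lines := PySem.Str.splitlines content
  let r := lines.foldl pvStepA ([], [], false)
  (PySem.Str.join "\n" r.1, PySem.Str.join "\n" r.2.1)

-- ===== PORT B =====
-- idx = first index whose line contains the marker, defaulting to len(lines);
-- lines[:idx] / lines[idx:] with 0 ≤ idx ≤ len(lines) are exactly take/drop.
def extract_traceability_py_alt (content : String) : String × String :=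
  let lines := PySem.Str.splitlines content
  let idx := lines.findIdx (fun line => PySem.Str.isIn "TRACEABILITY REPORT" line)
  (PySem.Str.join "\n" (lines.take idx), PySem.Str.join "\n" (lines.drop idx))

-- ===== PRECONDITION & SPEC =====
def Spec_extract_traceability_py (content : String) (out : String × String) : Prop := out = extract_traceability_py_alt content
instance (content : String) (out : String × String) : Decidable (Spec_extract_traceability_py content out) := by unfold Spec_extract_traceability_py; infer_instance

-- ===== CLAIM (what is proved, stated in full; the proofs are below) =====
def Claim_equal_extract_traceability_py : Prop := ∀ (content : String), Dom_extract_traceability_py content → Spec_extract_traceability_py content (extract_traceability_py content)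

-- ===== LEMMAS AND PROOFS =====
-- once in_trace is true, every remaining line goes to trace_lines
theorem pvFoldA_true (ls : List String) (c t : List String) :
    ls.foldl pvStepA (c, t, true) = (c, t ++ ls, true) := by
  induction ls generalizing t with
  | nil => simp
  | cons l ls ih =>
      simp [List.foldl_cons, pvStepA, ih]

-- with in_trace still false, the loop splits the rest at the first marker line
theorem pvFoldA_false (ls : List String) (c t : List String) :
    ls.foldl pvStepA (c, t, false) =
      let idx := ls.findIdx (fun line => PySem.Str.isIn "TRACEABILITY REPORT" line)
      (c ++ ls.take idx, t ++ ls.drop idx,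
        decide (idx < ls.length)) := by
  induction ls generalizing c with
  | nil => simp
  | cons l ls ih =>
      by_cases h : PySem.Str.isIn "TRACEABILITY REPORT" l
      · simp only [List.foldl_cons, pvStepA, h, if_true, List.findIdx_cons, cond_true]
        simp [pvFoldA_true]
      · simp only [List.foldl_cons, pvStepA, h, if_false, ih, List.findIdx_cons,
          Bool.false_eq_true, cond_false]
        simp [List.take_succ_cons, List.drop_succ_cons]

-- ===== VERDICT (by name: the statement is the Claim_ definition above) =====
theorem extract_traceability_py_spec : Claim_equal_extract_traceability_py := by
  intro content _
  unfold Spec_extract_traceability_py extract_traceability_py extract_traceability_py_alt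
  simp [pvFoldA_false]
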